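-- pv_equiv track=rewrite | github.com/abachu2005/AutoBarcoder | AutoBarcoder/barcode_processing/barcode_processor.py | replace_long_sequences
-- ===== SOURCE A (Python) =====
-- def replace_long_sequences(barcodes, length_threshold):
--     short_sequences = [barcode for barcode in barcodes if len(barcode) <= length_threshold]
--     long_sequences = [barcode for barcode in barcodes if len(barcode) > length_threshold]
--     replaced_sequences = []
--     for long_seq in long_sequences:
--         replaced = False
--         for short_seq in short_sequences:
--             if short_seq in long_seq:
--                 replaced_sequences.append(short_seq)
--                 replaced = True
--                 break
--         if not replaced:
--             replaced_sequences.append(long_seq)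
--     return short_sequences + replaced_sequences
-- ===== SOURCE B (Python) =====
-- def replace_long_sequences(barcodes, length_threshold):
--     shorts = [b for b in barcodes if len(b) <= length_threshold]
--     longs = [b for b in barcodes if len(b) > length_threshold]
--     # hash-index every short barcode by its first position in the list,
--     # then enumerate each long barcode's substrings and look them up,
--     # keeping the match with the smallest index (= first in list order)
--     index = {}
--     for i, s in enumerate(shorts):
--         index.setdefault(s, i)
--     out = list(shorts)
--     for l in longs:
--         best = None  # (index in shorts, matched short)
--         n = len(l)
--         for start in range(n + 1):
--             for stop in range(start, n + 1):
--                 sub = l[start:stop]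
--                 j = index.get(sub)
--                 if j is not None and (best is None or j < best[0]):
--                     best = (j, sub)
--         out.append(l if best is None else best[1])
--     return out
-- ===== Notes on version B (the rewrite author's own statement) =====
-- stated objective: alternative
-- what changed: B builds a hash index of the short barcodes once and, for each long barcode, enumerates its substrings and looks them up, keeping the hit with the smallest index — replacing A's per-long linear scan over all shorts with per-pattern substring search.
import Mathlib
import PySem

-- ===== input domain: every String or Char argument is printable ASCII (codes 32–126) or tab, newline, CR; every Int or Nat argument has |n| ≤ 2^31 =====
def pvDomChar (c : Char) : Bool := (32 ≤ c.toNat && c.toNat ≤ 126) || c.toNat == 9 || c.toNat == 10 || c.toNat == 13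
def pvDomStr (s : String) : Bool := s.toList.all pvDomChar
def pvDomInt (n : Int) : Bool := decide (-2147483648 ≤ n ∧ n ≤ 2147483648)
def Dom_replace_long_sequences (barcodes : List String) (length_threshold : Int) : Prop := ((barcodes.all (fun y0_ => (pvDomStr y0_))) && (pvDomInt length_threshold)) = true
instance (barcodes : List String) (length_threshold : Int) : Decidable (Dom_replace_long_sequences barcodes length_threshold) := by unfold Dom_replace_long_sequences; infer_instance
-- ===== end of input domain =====

-- B replaces A's per-long scan over all short barcodes by a hash index of the shorts:
-- it enumerates each long's substrings and looks them up, keeping the smallest-index hit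
-- (an alternative multi-pattern-matching algorithm; no speed claim).

-- ===== PORT A =====
-- inner 'for short_seq in short_sequences: … break' loop with the 'replaced' flag:
-- on the first substring hit it appends the short and stops; if none hit, appends the long.
def pvInnerA (shorts : List String) (l : String) (acc : List String) : List String :=
  match shorts with
  | [] => acc ++ [l]
  | s :: rest => if PySem.Str.isIn s l then acc ++ [s] else pvInnerA rest l acc

def replace_long_sequences (barcodes : List String) (length_threshold : Int) : List String :=
  let short_sequences := barcodes.filter (fun b => decide ((PySem.Str.len b : Int) ≤ length_threshold))
  let long_sequences := barcodes.filter (fun b => decide ((PySem.Str.len b : Int) > length_threshold))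
  let replaced_sequences := long_sequences.foldl (fun acc l => pvInnerA short_sequences l acc) []
  short_sequences ++ replaced_sequences

-- ===== PORT B =====
-- body of Source B's innermost statement: look the substring l[start:stop] up in the index,
-- keep it as 'best' if it hits with a smaller index than the current best
def pvStepB (index : PySem.Dict String Int) (l : String) (best : Option (Int × String))
    (start stop : Int) : Option (Int × String) :=
  let sub := PySem.Str.slice l (some start) (some stop)
  match index.get? sub with
  | none => best
  | some j =>
    match best with
    | none => some (j, sub)
    | some b => if j < b.1 then some (j, sub) else best

-- the two nested 'for start in range(n+1): for stop in range(start, n+1):' loops of Source B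
def pvInnerB (index : PySem.Dict String Int) (l : String) : Option (Int × String) :=
  let n : Int := (PySem.Str.len l : Int)
  (PySem.List.pyRange 0 (n + 1) 1).foldl
    (fun best start =>
      (PySem.List.pyRange start (n + 1) 1).foldl
        (fun best stop => pvStepB index l best start stop) best)
    none

def replace_long_sequences_alt (barcodes : List String) (length_threshold : Int) : List String :=
  let shorts := barcodes.filter (fun b => decide ((PySem.Str.len b : Int) ≤ length_threshold))
  let longs := barcodes.filter (fun b => decide ((PySem.Str.len b : Int) > length_threshold))
  -- 'for i, s in enumerate(shorts): index.setdefault(s, i)'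
  let index := (PySem.List.enumerate shorts 0).foldl
    (fun d (p : Int × String) => d.setdefault p.2 p.1) PySem.Dict.empty
  longs.foldl
    (fun out l =>
      out ++ [match pvInnerB index l with
              | none => l
              | some b => b.2])
    shorts

-- ===== PRECONDITION & SPEC =====
def Spec_replace_long_sequences (barcodes : List String) (length_threshold : Int) (out : List String) : Prop := out = replace_long_sequences_alt barcodes length_threshold
instance (barcodes : List String) (length_threshold : Int) (out : List String) : Decidable (Spec_replace_long_sequences barcodes length_threshold out) := by unfold Spec_replace_long_sequences; infer_instance

-- ===== CLAIM (what is proved, stated in full; the proofs are below) =====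
def Claim_equal_replace_long_sequences : Prop := ∀ (barcodes : List String) (length_threshold : Int), Dom_replace_long_sequences barcodes length_threshold → Spec_replace_long_sequences barcodes length_threshold (replace_long_sequences barcodes length_threshold)

-- ===== LEMMAS AND PROOFS =====

-- the common specification value: each long replaced by the first short that is a substring
def pvRepl (shorts : List String) (l : String) : String :=
  (shorts.find? (fun s => PySem.Str.isIn s l)).getD l

-- ---- A's side: the nested loops compute pvRepl (as in the spec) ----
theorem pvInnerA_eq (shorts : List String) (l : String) (acc : List String) :
    pvInnerA shorts l acc = acc ++ [pvRepl shorts l] := by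
  induction shorts with
  | nil => rfl
  | cons s rest ih =>
    by_cases h : PySem.Str.isIn s l = true
    · rw [show pvInnerA (s :: rest) l acc
            = if PySem.Str.isIn s l = true then acc ++ [s] else pvInnerA rest l acc from rfl,
        if_pos h]
      unfold pvRepl
      rw [List.find?_cons_of_pos (p := fun s => PySem.Str.isIn s l) h]
      rfl
    · rw [show pvInnerA (s :: rest) l acc
            = if PySem.Str.isIn s l = true then acc ++ [s] else pvInnerA rest l acc from rfl,
        if_neg h, ih]
      unfold pvRepl
      rw [List.find?_cons_of_neg (p := fun s => PySem.Str.isIn s l) h]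

theorem foldA_eq (shorts : List String) (longs : List String) (acc : List String) :
    longs.foldl (fun acc l => pvInnerA shorts l acc) acc
      = acc ++ longs.map (pvRepl shorts) := by
  induction longs generalizing acc with
  | nil => simp
  | cons l ls ih =>
    rw [List.foldl_cons, pvInnerA_eq, ih]
    simp

-- ---- B's side ----
-- the index built by Source B's setdefault loop
def pvIndex (shorts : List String) : PySem.Dict String Int :=
  (PySem.List.enumerate shorts 0).foldl
    (fun d (p : Int × String) => d.setdefault p.2 p.1) PySem.Dict.empty

-- candidate produced by one (start, stop) pair, and the min-combining step
def pvCand (index : PySem.Dict String Int) (l : String) (start stop : Int) :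
    Option (Int × String) :=
  (index.get? (PySem.Str.slice l (some start) (some stop))).map
    (fun j => (j, PySem.Str.slice l (some start) (some stop)))

def pvMin (best : Option (Int × String)) (c : Int × String) : Option (Int × String) :=
  match best with
  | none => some c
  | some b => if c.1 < b.1 then some c else best

-- the flattened candidate list the double loop effectively folds pvMin over
def pvCL (index : PySem.Dict String Int) (l : String) : List (Int × String) :=
  let n : Int := (PySem.Str.len l : Int)
  (PySem.List.pyRange 0 (n + 1) 1).flatMap
    (fun start => ((PySem.List.pyRange start (n + 1) 1).map
        (fun stop => pvCand index l start stop)).reduceOption)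

theorem pvStepB_eq (index : PySem.Dict String Int) (l : String) (best : Option (Int × String))
    (start stop : Int) :
    pvStepB index l best start stop
      = match pvCand index l start stop with
        | none => best
        | some c => pvMin best c := by
  cases h : index.get? (PySem.Str.slice l (some start) (some stop)) <;>
    cases best <;> simp [pvStepB, pvCand, pvMin, h]

theorem foldl_mcomb_map {α : Type} (f : α → Option (Int × String)) (xs : List α)
    (init : Option (Int × String)) :
    xs.foldl (fun b x => match f x with | none => b | some c => pvMin b c) init
      = ((xs.map f).reduceOption).foldl pvMin init := by
  induction xs generalizing init with
  | nil => rfl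
  | cons x xs ih =>
    cases h : f x <;> simp [List.reduceOption_cons_of_some, h, ih]

theorem foldl_flat {α : Type} (m : α → List (Int × String)) (xs : List α)
    (init : Option (Int × String)) :
    xs.foldl (fun b x => (m x).foldl pvMin b) init
      = (xs.flatMap m).foldl pvMin init := by
  induction xs generalizing init with
  | nil => rfl
  | cons x xs ih => simp [List.flatMap_cons, List.foldl_append, ih]

theorem pvInnerB_eq_CL (index : PySem.Dict String Int) (l : String) :
    pvInnerB index l = (pvCL index l).foldl pvMin none := by
  simp only [pvInnerB, pvCL]
  rw [← foldl_flat]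
  congr 1
  funext best start
  rw [← foldl_mcomb_map]
  congr 1
  funext b stop
  exact pvStepB_eq index l b start stop

-- min-fold lemmas
theorem foldl_pvMin_keep (c0 : Int × String) (D : List (Int × String))
    (h : ∀ c ∈ D, c0.1 ≤ c.1) : D.foldl pvMin (some c0) = some c0 := by
  induction D with
  | nil => rfl
  | cons c D ih =>
    have hc := h c (List.mem_cons_self)
    rw [List.foldl_cons, show pvMin (some c0) c = if c.1 < c0.1 then some c else some c0 from rfl,
      if_neg (by omega)]
    exact ih (fun c hc => h c (List.mem_cons_of_mem _ hc))

theorem foldl_pvMin_min (c0 : Int × String) (D : List (Int × String))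
    (acc : Option (Int × String)) (h0 : c0 ∈ D)
    (hmin : ∀ c ∈ D, c0.1 ≤ c.1 ∧ (c.1 = c0.1 → c = c0))
    (hacc : acc = none ∨ ∃ b, acc = some b ∧ c0.1 < b.1) :
    D.foldl pvMin acc = some c0 := by
  induction D generalizing acc with
  | nil => exact absurd h0 (List.not_mem_nil)
  | cons c D ih =>
    rw [List.foldl_cons]
    by_cases hc : c = c0
    · subst hc
      have hstep : pvMin acc c = some c := by
        rcases hacc with rfl | ⟨b, rfl, hb⟩
        · rfl
        · exact if_pos hb
      rw [hstep]
      exact foldl_pvMin_keep c D (fun c hc => (hmin c (List.mem_cons_of_mem _ hc)).1)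
    · have h0' : c0 ∈ D := by
        rcases List.mem_cons.mp h0 with h | h
        · exact absurd h.symm hc
        · exact h
      have hlt : c0.1 < c.1 := by
        have := hmin c (List.mem_cons_self)
        rcases lt_or_eq_of_le this.1 with h | h
        · exact h
        · exact absurd (this.2 h.symm) hc
      refine ih _ h0' (fun c hc => hmin c (List.mem_cons_of_mem _ hc)) ?_
      rcases hacc with rfl | ⟨b, rfl, hb⟩
      · exact Or.inr ⟨c, rfl, hlt⟩
      · right
        by_cases hcb : c.1 < b.1
        · exact ⟨c, by simp [pvMin, hcb], hlt⟩
        · exact ⟨b, by simp [pvMin, hcb], hb⟩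

-- dict characterization: the setdefault loop keys each short by its FIRST index
theorem get?_setdefault (d : PySem.Dict String Int) (k' k : String) (v : Int) :
    (d.setdefault k v).get? k'
      = match d.get? k with
        | some _ => d.get? k'
        | none => (d.insert k v).get? k' := by
  by_cases h : d.contains k = true
  · have hk : d.get? k ≠ none := fun hn => by
      rw [(PySem.Dict.get?_eq_none_iff_contains d k).mp hn] at h
      exact Bool.noConfusion h
    cases hg : d.get? k with
    | none => exact absurd hg hk
    | some w => simp [PySem.Dict.setdefault, h]
  · have hk : d.get? k = none :=
      (PySem.Dict.get?_eq_none_iff_contains d k).mpr (by simpa using h)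
    have hsd : d.setdefault k v = d.insert k v := by
      apply PySem.Dict.ext
      rw [PySem.Dict.items_insert_of_not_contains d v (by simpa using h)]
      simp [PySem.Dict.setdefault, h]
    rw [hsd, hk]

theorem get?_buildAux (shorts : List String) (k : Int) (d : PySem.Dict String Int) (s : String) :
    ((PySem.List.enumerate shorts k).foldl
        (fun d (p : Int × String) => d.setdefault p.2 p.1) d).get? s
      = match d.get? s with
        | some v => some v
        | none => if s ∈ shorts then some (k + (shorts.idxOf s : Int)) else none := by
  induction shorts generalizing k d with
  | nil =>
    rw [PySem.List.enumerate_nil]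
    cases hg : d.get? s <;> simp [hg]
  | cons t rest ih =>
    rw [PySem.List.enumerate_cons, List.foldl_cons, ih, get?_setdefault]
    cases hgt : d.get? t with
    | some w =>
      cases hgs : d.get? s with
      | some w' => rfl
      | none =>
        have hst : s ≠ t := by
          intro h; rw [h, hgt] at hgs; simp at hgs
        simp only [List.mem_cons, List.idxOf_cons_ne _ (Ne.symm hst)]
        by_cases hm : s ∈ rest
        · rw [if_pos hm, if_pos (Or.inr hm)]
          congr 1
          push_cast
          ring
        · rw [if_neg hm, if_neg (by tauto)]
    | none =>
      by_cases hst : s = t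
      · subst hst
        rw [PySem.Dict.get?_insert, if_pos rfl, hgt]
        simp [List.idxOf_cons_self]
      · rw [PySem.Dict.get?_insert, if_neg hst]
        cases hgs : d.get? s with
        | some w' => rfl
        | none =>
          simp only [List.mem_cons, List.idxOf_cons_ne _ (Ne.symm hst)]
          by_cases hm : s ∈ rest
          · rw [if_pos hm, if_pos (Or.inr hm)]
            congr 1
            push_cast
            ring
          · rw [if_neg hm, if_neg (by tauto)]

theorem get?_pvIndex (shorts : List String) (s : String) :
    (pvIndex shorts).get? s
      = if s ∈ shorts then some ((shorts.idxOf s : Nat) : Int) else none := by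
  unfold pvIndex
  rw [get?_buildAux, PySem.Dict.get?_empty]
  simp

-- slices of l are exactly the infixes of l
theorem slice_infix (l : String) (start stop : Int) (h0 : 0 ≤ start) (h1 : 0 ≤ stop) :
    (PySem.Str.slice l (some start) (some stop)).toList <:+: l.toList := by
  rw [PySem.Str.toList_slice, PySem.Chars.slice_eq_listSlice, PySem.List.slice_toNat _ h0 h1]
  exact (List.take_prefix _ _).isInfix.trans (List.drop_suffix _ _).isInfix

theorem infix_slice (l s0 : String) (h : s0.toList <:+: l.toList) :
    ∃ a b : Nat, a ≤ b ∧ b ≤ l.toList.length ∧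
      PySem.Str.slice l (some (a : Int)) (some (b : Int)) = s0 := by
  obtain ⟨u, v, huv⟩ := h
  refine ⟨u.length, u.length + s0.toList.length, by omega, ?_, ?_⟩
  · have := congrArg List.length huv
    simp only [List.length_append] at this
    omega
  · rw [← String.toList_inj, PySem.Str.toList_slice, PySem.Chars.slice_eq_listSlice,
      PySem.List.slice_toNat _ (by positivity) (by positivity)]
    simp only [Int.toNat_natCast]
    rw [Nat.add_sub_cancel_left, ← huv, List.append_assoc, List.drop_left, List.take_left]

-- find? returns the element with the smallest index among those satisfying p
theorem find?_idxOf_le {p : String → Bool} {shorts : List String} {s0 : String}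
    (h : shorts.find? p = some s0) (s : String) (hs : s ∈ shorts) (hp : p s = true) :
    shorts.idxOf s0 ≤ shorts.idxOf s := by
  induction shorts with
  | nil => exact absurd h (by simp)
  | cons t rest ih =>
    cases hpt : p t with
    | true =>
      rw [List.find?_cons_of_pos hpt] at h
      cases Option.some.inj h
      simp [List.idxOf_cons_self]
    | false =>
      rw [List.find?_cons_of_neg (by simp [hpt])] at h
      have hs0t : s0 ≠ t := by
        intro he; rw [he] at h; rw [List.find?_some h] at hpt; exact Bool.noConfusion hpt
      have hst : s ≠ t := by
        intro he; rw [he] at hp; rw [hp] at hpt; exact Bool.noConfusion hpt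
      have hsr : s ∈ rest := by
        rcases List.mem_cons.mp hs with he | hm
        · exact absurd he hst
        · exact hm
      rw [List.idxOf_cons_ne _ (Ne.symm hs0t), List.idxOf_cons_ne _ (Ne.symm hst)]
      exact Nat.succ_le_succ (ih h hsr)

-- membership in the candidate list, spelled out
theorem mem_pvCL_iff (index : PySem.Dict String Int) (l : String) (c : Int × String) :
    c ∈ pvCL index l
      ↔ ∃ start stop : Int, 0 ≤ start ∧ start ≤ stop ∧ stop ≤ PySem.Str.len l ∧
          pvCand index l start stop = some c := by
  simp only [pvCL, List.mem_flatMap, List.reduceOption_mem_iff, List.mem_map,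
    PySem.List.mem_pyRange_one]
  constructor
  · rintro ⟨start, ⟨h0, h1⟩, stop, ⟨h2, h3⟩, hc⟩
    exact ⟨start, stop, h0, h2, by omega, hc⟩
  · rintro ⟨start, stop, h0, h2, h3, hc⟩
    exact ⟨start, ⟨h0, by omega⟩, stop, ⟨h2, by omega⟩, hc⟩

-- every candidate is a short that occurs in l, keyed by its first index
theorem cand_spec (shorts : List String) (l : String) (start stop : Int) (c : Int × String)
    (h0 : 0 ≤ start) (h1 : start ≤ stop)
    (h : pvCand (pvIndex shorts) l start stop = some c) :
    c.2 ∈ shorts ∧ c.1 = ((shorts.idxOf c.2 : Nat) : Int) ∧ PySem.Str.isIn c.2 l = true := by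
  simp only [pvCand, get?_pvIndex] at h
  by_cases hm : PySem.Str.slice l (some start) (some stop) ∈ shorts
  · rw [if_pos hm] at h
    simp only [Option.map_some, Option.some.injEq] at h
    subst h
    refine ⟨hm, rfl, ?_⟩
    rw [PySem.Str.isIn_iff_infix]
    exact slice_infix l start stop h0 (le_trans h0 h1)
  · rw [if_neg hm] at h
    simp at h

-- the per-long result of B equals pvRepl
theorem innerB_eq (shorts : List String) (l : String) :
    (match pvInnerB (pvIndex shorts) l with
     | none => l
     | some b => b.2) = pvRepl shorts l := by
  rw [pvInnerB_eq_CL]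
  cases hf : shorts.find? (fun s => PySem.Str.isIn s l) with
  | none =>
    have hCL : pvCL (pvIndex shorts) l = [] := by
      rw [List.eq_nil_iff_forall_not_mem]
      intro c hc
      obtain ⟨start, stop, h0, h1, _, hcand⟩ := (mem_pvCL_iff _ _ c).mp hc
      obtain ⟨hm, _, hin⟩ := cand_spec shorts l start stop c h0 h1 hcand
      exact (List.find?_eq_none.mp hf c.2 hm) hin
    rw [hCL]
    unfold pvRepl
    rw [hf]
    rfl
  | some s0 =>
    have hin0 : PySem.Str.isIn s0 l = true :=
      List.find?_some (p := fun s => PySem.Str.isIn s l) hf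
    have hm0 : s0 ∈ shorts :=
      List.mem_of_find?_eq_some (p := fun s => PySem.Str.isIn s l) hf
    obtain ⟨a, b, hab, hbl, hsl⟩ := infix_slice l s0 ((PySem.Str.isIn_iff_infix s0 l).mp hin0)
    have hmem : (((shorts.idxOf s0 : Nat) : Int), s0) ∈ pvCL (pvIndex shorts) l := by
      rw [mem_pvCL_iff]
      refine ⟨(a : Int), (b : Int), by positivity, by exact_mod_cast hab, ?_, ?_⟩
      · show (b : Int) ≤ (l.toList.length : Int)
        exact_mod_cast hbl
      · simp only [pvCand, hsl, get?_pvIndex, if_pos hm0, Option.map_some]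
    have hminall : ∀ c ∈ pvCL (pvIndex shorts) l,
        (((shorts.idxOf s0 : Nat) : Int), s0).1 ≤ c.1 ∧
          (c.1 = (((shorts.idxOf s0 : Nat) : Int), s0).1 → c = (((shorts.idxOf s0 : Nat) : Int), s0)) := by
      intro c hc
      obtain ⟨start, stop, h0, h1, _, hcand⟩ := (mem_pvCL_iff _ _ c).mp hc
      obtain ⟨hm, hidx, hin⟩ := cand_spec shorts l start stop c h0 h1 hcand
      have hle : shorts.idxOf s0 ≤ shorts.idxOf c.2 := find?_idxOf_le hf c.2 hm hin
      constructor
      · rw [hidx]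
        show ((shorts.idxOf s0 : Nat) : Int) ≤ ((shorts.idxOf c.2 : Nat) : Int)
        exact_mod_cast hle
      · intro he
        have hidxeq : shorts.idxOf c.2 = shorts.idxOf s0 := by
          rw [hidx] at he
          have he' : ((shorts.idxOf c.2 : Nat) : Int) = ((shorts.idxOf s0 : Nat) : Int) := he
          exact_mod_cast he'
        have hc2 : c.2 = s0 := by
          have hg1 : shorts[shorts.idxOf c.2]'(List.idxOf_lt_length_of_mem hm) = c.2 :=
            List.getElem_idxOf _
          have hg2 : shorts[shorts.idxOf s0]'(List.idxOf_lt_length_of_mem hm0) = s0 :=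
            List.getElem_idxOf _
          rw [← hg1, ← hg2]
          simp [hidxeq]
        refine Prod.ext ?_ hc2
        rw [hidx, hidxeq]
    rw [foldl_pvMin_min _ _ none hmem hminall (Or.inl rfl)]
    unfold pvRepl
    rw [hf]
    rfl

theorem foldB_out (longs : List String) (g : String → String) (acc : List String) :
    longs.foldl (fun out l => out ++ [g l]) acc = acc ++ longs.map g := by
  induction longs generalizing acc with
  | nil => simp
  | cons l ls ih => simp [ih]

-- ===== VERDICT (by name: the statement is the Claim_ definition above) =====
theorem replace_long_sequences_spec : Claim_equal_replace_long_sequences := by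
  intro barcodes t _
  simp only [Spec_replace_long_sequences, replace_long_sequences, replace_long_sequences_alt]
  rw [foldA_eq]
  rw [show ((PySem.List.enumerate (barcodes.filter (fun b => decide ((PySem.Str.len b : Int) ≤ t))) 0).foldl
      (fun d (p : Int × String) => d.setdefault p.2 p.1) PySem.Dict.empty)
    = pvIndex (barcodes.filter (fun b => decide ((PySem.Str.len b : Int) ≤ t))) from rfl]
  rw [foldB_out]
  simp only [List.nil_append]
  congr 1
  apply List.map_congr_left
  intro l _
  exact (innerB_eq _ l).symm
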